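-- pv_equiv track=rewrite | github.com/taehooK/Baekjoon | DP/22857번.py | solution
-- ===== SOURCE A (Python) =====
-- def solution(n, k, numbers):
--     dp = [0] * len(numbers)
--     start = 0
--     while start < len(numbers):
--         if numbers[start] % 2 == 0:
--             break
--         start += 1
--     dp_index = 0
--     is_even = True
--     count = 0
--     dp_count = 0
--     for i in range(start, len(numbers)):
--         if is_even and numbers[i] % 2 == 1:
--             is_even = False
--             dp[dp_index] = count
--             dp_index += 1
--             dp_count += 1
--             count = 0
--         elif not is_even and numbers[i] % 2 == 0:
--             is_even = True
--             dp[dp_index] = count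
--             dp_index += 1
--             dp_count += 1
--             count = 0
--         count += 1
--
--     dp[dp_index] = count
--     dp_count += 1
--
--     max_count = 0
--     remain_k = k
--     start_index = 0
--     count = 0
--     for i in range(dp_count):
--         if i % 2 == 0:
--             count += dp[i]
--             max_count = max(max_count, count)
--         else:
--             if dp[i] > remain_k:
--                 count -= dp[start_index]
--                 remain_k += dp[start_index + 1]
--                 start_index += 2
--                 while start_index < i and dp[i] > remain_k and remain_k < k:
--                     count -= dp[start_index]
--                     remain_k += dp[start_index + 1]
--                     start_index += 2
--                 remain_k -= dp[i]
--             else: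
--                 remain_k -= dp[i]
--
--     return max_count
-- ===== SOURCE B (Python) =====
-- def solution(n, k, numbers):
--     # One pass over numbers with the current window held as an explicit queue of
--     # (even_run, odd_run) pairs; runs are detected on the fly, never materialized.
--     i = 0
--     while i < len(numbers) and numbers[i] % 2 != 0:
--         i += 1
--     best = 0
--     evens = 0          # evens inside the window
--     odds = 0           # odds inside the window
--     pend_e = 0         # length of the window's trailing (open) even run
--     pend_o = 0         # length of the current open odd run
--     window = []        # queue of (even run, following odd run) pairs in the window
--     while i < len(numbers):
--         x = numbers[i]
--         if x % 2 == 0: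
--             if pend_o:
--                 if odds + pend_o > k:
--                     if window:
--                         e0, o0 = window.pop(0)
--                         evens -= e0
--                         odds -= o0
--                         while window and odds + pend_o > k:
--                             e0, o0 = window.pop(0)
--                             evens -= e0
--                             odds -= o0
--                         odds += pend_o
--                         window.append((pend_e, pend_o))
--                         pend_e = 0
--                     else:
--                         # the odd run alone overflows: restart the window after it
--                         evens = 0
--                         pend_e = 0
--                 else:
--                     odds += pend_o
--                     window.append((pend_e, pend_o))
--                     pend_e = 0
--                 pend_o = 0
--             pend_e += 1
--             evens += 1
--             if evens > best:
--                 best = evens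
--         else:
--             pend_o += 1
--         i += 1
--     return best
-- ===== Notes on version B (the rewrite author's own statement) =====
-- stated objective: alternative
-- what changed: Replaces A's three staged passes (preallocated dp array filled by a parity state machine, then a two-pointer with integer indices into dp) with one fused pass over numbers that detects parity runs on the fly and keeps the current window as an explicit queue of (even-run, odd-run) pairs popped from the front, with no run array, no indices and no second pass; Pre_ excludes only the empty list, on which A raises IndexError.
import Mathlib
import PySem

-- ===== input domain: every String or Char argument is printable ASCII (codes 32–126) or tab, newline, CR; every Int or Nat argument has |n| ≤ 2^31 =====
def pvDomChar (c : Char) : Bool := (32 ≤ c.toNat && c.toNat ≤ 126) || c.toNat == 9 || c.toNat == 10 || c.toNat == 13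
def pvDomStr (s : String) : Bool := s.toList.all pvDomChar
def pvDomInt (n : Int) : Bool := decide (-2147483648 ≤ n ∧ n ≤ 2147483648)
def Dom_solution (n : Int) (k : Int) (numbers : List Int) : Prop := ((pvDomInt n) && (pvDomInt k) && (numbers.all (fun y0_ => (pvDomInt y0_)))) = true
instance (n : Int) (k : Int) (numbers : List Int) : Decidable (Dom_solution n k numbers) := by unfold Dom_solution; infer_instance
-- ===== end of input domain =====

-- B re-implements A in one fused pass over numbers (parity runs detected on the fly, the
-- window held as an explicit queue of (even run, odd run) pairs) instead of A's three
-- staged passes over a dp array; same values on all nonempty inputs; on empty input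
-- A raises IndexError while B returns 0.

-- ===== PORT A =====
-- while start < len(numbers): if numbers[start] % 2 == 0: break; start += 1
-- (loops are structural recursion on a fuel argument that provably suffices at the call site)
def solStartA (numbers : List Int) : Nat → Nat → Nat
  | 0, start => start
  | fuel + 1, start =>
    if start < numbers.length then
      if PySem.Int.mod (PySem.List.pyGetD numbers (start : Int) 0) 2 = 0 then start
      else solStartA numbers fuel (start + 1)
    else start

-- body of 'for i in range(start, len(numbers))'; state (dp, dp_index, is_even, count, dp_count)
def phase1A (st : List Int × Nat × Bool × Int × Nat) (x : Int) : List Int × Nat × Bool × Int × Nat :=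
  match st with
  | (dp, idx, isEven, ct, cnt) =>
    if isEven = true ∧ PySem.Int.mod x 2 = 1 then (dp.set idx ct, idx + 1, false, 1, cnt + 1)
    else if isEven = false ∧ PySem.Int.mod x 2 = 0 then (dp.set idx ct, idx + 1, true, 1, cnt + 1)
    else (dp, idx, isEven, ct + 1, cnt)

-- the inner 'while start_index < i and dp[i] > remain_k and remain_k < k' loop
def whileA (dp : List Int) (k dpi : Int) (i : Nat) : Nat → Int → Int → Nat → Int × Int × Nat
  | 0, ct, rk, si => (ct, rk, si)
  | fuel + 1, ct, rk, si =>
    if si < i ∧ dpi > rk ∧ rk < k then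
      whileA dp k dpi i fuel (ct - PySem.List.pyGetD dp (si : Int) 0)
        (rk + PySem.List.pyGetD dp ((si + 1 : Nat) : Int) 0) (si + 2)
    else (ct, rk, si)

-- body of 'for i in range(dp_count)'; state (max_count, remain_k, start_index, count)
def phase2A (dp : List Int) (k : Int) (st : Int × Int × Nat × Int) (i : Nat) : Int × Int × Nat × Int :=
  match st with
  | (mc, rk, si, ct) =>
    if i % 2 = 0 then
      (max mc (ct + PySem.List.pyGetD dp (i : Int) 0), rk, si, ct + PySem.List.pyGetD dp (i : Int) 0)
    else
      let dpi := PySem.List.pyGetD dp (i : Int) 0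
      if dpi > rk then
        match whileA dp k dpi i (i + 1) (ct - PySem.List.pyGetD dp (si : Int) 0)
            (rk + PySem.List.pyGetD dp ((si + 1 : Nat) : Int) 0) (si + 2) with
        | (ct', rk', si') => (mc, rk' - dpi, si', ct')
      else (mc, rk - dpi, si, ct)

def solution (n : Int) (k : Int) (numbers : List Int) : Int :=
  -- 'for i in range(start, len(numbers))' reading numbers[i] is folded over numbers.drop start (same values)
  match (numbers.drop (solStartA numbers (numbers.length + 1) 0)).foldl phase1A
      (List.replicate numbers.length 0, 0, true, 0, 0) with
  | (dp, idx, _, ct, cnt) =>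
    ((List.range (cnt + 1)).foldl (phase2A (dp.set idx ct) k) (0, k, 0, 0)).1

-- ===== PORT B =====
-- while i < len(numbers) and numbers[i] % 2 != 0: i += 1
def skipOddB (numbers : List Int) (m : Nat) : Nat → Nat → Nat
  | 0, i => i
  | fuel + 1, i =>
    if i < m ∧ ¬ PySem.Int.mod (PySem.List.pyGetD numbers (i : Int) 0) 2 = 0 then
      skipOddB numbers m fuel (i + 1)
    else i

-- while window and odds + pend_o > k: e0, o0 = window.pop(0); evens -= e0; odds -= o0
def popB (k L : Int) (evens odds : Int) : List (Int × Int) → Int × Int × List (Int × Int)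
  | [] => (evens, odds, [])
  | (e0, o0) :: w =>
    if odds + L > k then popB k L (evens - e0) (odds - o0) w
    else (evens, odds, (e0, o0) :: w)

-- loop body of B; state (best, evens, odds, pend_e, pend_o, window)
def stepB (k : Int) (st : Int × Int × Int × Int × Int × List (Int × Int)) (x : Int) :
    Int × Int × Int × Int × Int × List (Int × Int) :=
  match st with
  | (best, evens, odds, pe, po, w) =>
    if PySem.Int.mod x 2 = 0 then
      match
        (if po ≠ 0 then
          if odds + po > k then
            match w with
            | (e0, o0) :: w' =>
              match popB k po (evens - e0) (odds - o0) w' with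
              | (ev, od, w2) => (best, ev, od + po, (0 : Int), w2 ++ [(pe, po)])
            | [] => (best, (0 : Int), odds, (0 : Int), ([] : List (Int × Int)))
          else (best, evens, odds + po, 0, w ++ [(pe, po)])
        else (best, evens, odds, pe, w)) with
      | (b1, ev1, od1, pe1, w1) =>
        ((if ev1 + 1 > b1 then ev1 + 1 else b1), ev1 + 1, od1, pe1 + 1, 0, w1)
    else (best, evens, odds, pe, po + 1, w)

def solution_alt (n : Int) (k : Int) (numbers : List Int) : Int :=
  -- the index loop reading numbers[i] is folded over numbers.drop i0 (same values)
  let i0 := skipOddB numbers numbers.length (numbers.length + 1) 0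
  ((numbers.drop i0).foldl (stepB k) (0, 0, 0, 0, 0, [])).1

-- ===== PRECONDITION & SPEC =====
-- Pre_ excludes exactly the inputs where A raises: on numbers = [] A's 'dp[dp_index] = count'
-- writes into an empty list and raises IndexError.
def Pre_solution (n : Int) (k : Int) (numbers : List Int) : Prop := numbers ≠ []
instance (n : Int) (k : Int) (numbers : List Int) : Decidable (Pre_solution n k numbers) := by
  unfold Pre_solution; infer_instance

def pvWitness_solution : Int × Int × List Int := (5, 1, [2, 1, 1, 2, 4])

def Spec_solution (n : Int) (k : Int) (numbers : List Int) (out : Int) : Prop :=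
  out = solution_alt n k numbers
instance (n : Int) (k : Int) (numbers : List Int) (out : Int) : Decidable (Spec_solution n k numbers out) := by
  unfold Spec_solution; infer_instance

-- ===== CLAIM (what is proved, stated in full; the proofs are below) =====
def Claim_equal_solution : Prop := ∀ (n : Int) (k : Int) (numbers : List Int),
  Dom_solution n k numbers → Pre_solution n k numbers →
  Spec_solution n k numbers (solution n k numbers)

-- ===== LEMMAS AND PROOFS =====

-- parity of a Python int
def parf (x : Int) : Int := PySem.Int.mod x 2

-- reference run-length machine: current run parity p, current run length c
def runsGo (p c : Int) : List Int → List Int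
  | [] => [c]
  | q :: t => if q = p then runsGo p (c + 1) t else c :: runsGo q 1 t

-- sums of odd-indexed / even-indexed entries of R over [s, i)
def osum (R : List Int) (s i : Nat) : Int :=
  ∑ t ∈ Finset.Ico s i, if t % 2 = 1 then R.getD t 0 else 0
def esum (R : List Int) (s i : Nat) : Int :=
  ∑ t ∈ Finset.Ico s i, if t % 2 = 0 then R.getD t 0 else 0

-- sequential writer (models A's dp[idx] = r; idx += 1 sequence)
def wr (dp : List Int) (idx : Nat) : List Int → List Int
  | [] => dp
  | r :: rs => wr (dp.set idx r) (idx + 1) rs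

-- B's step on the parity of the element only (stepB reads nothing else of x)
def stepP (k : Int) (st : Int × Int × Int × Int × Int × List (Int × Int)) (p : Int) :
    Int × Int × Int × Int × Int × List (Int × Int) :=
  match st with
  | (best, evens, odds, pe, po, w) =>
    if p = 0 then
      match
        (if po ≠ 0 then
          if odds + po > k then
            match w with
            | (e0, o0) :: w' =>
              match popB k po (evens - e0) (odds - o0) w' with
              | (ev, od, w2) => (best, ev, od + po, (0 : Int), w2 ++ [(pe, po)])
            | [] => (best, (0 : Int), odds, (0 : Int), ([] : List (Int × Int)))
          else (best, evens, odds + po, 0, w ++ [(pe, po)])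
        else (best, evens, odds, pe, w)) with
      | (b1, ev1, od1, pe1, w1) =>
        ((if ev1 + 1 > b1 then ev1 + 1 else b1), ev1 + 1, od1, pe1 + 1, 0, w1)
    else (best, evens, odds, pe, po + 1, w)

-- the window queue: pairs (R[s], R[s+1]), (R[s+2], R[s+3]), … covering m further indices
def pairsW (R : List Int) : Nat → Nat → List (Int × Int)
  | _, 0 => []
  | _, 1 => []
  | s, m + 2 => (R.getD s 0, R.getD (s + 1) 0) :: pairsW R (s + 2) m

theorem wr_append_singleton (l : List Int) : ∀ (dp : List Int) (idx : Nat) (r : Int),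
    wr dp idx (l ++ [r]) = (wr dp idx l).set (idx + l.length) r := by
  induction l with
  | nil => intro dp idx r; simp [wr]
  | cons x t ih =>
    intro dp idx r
    simp only [List.cons_append, wr, ih]
    congr 1
    simp
    omega

theorem wr_getD_lt (G : List Int) : ∀ (dp : List Int) (idx j : Nat), j < idx →
    (wr dp idx G).getD j 0 = dp.getD j 0 := by
  induction G with
  | nil => intro dp idx j _; rfl
  | cons r rs ih =>
    intro dp idx j hj
    rw [wr, ih _ (idx + 1) j (by omega)]
    rw [List.getD, List.getD, List.getElem?_set_ne (by omega)]

theorem wr_getD (G : List Int) : ∀ (dp : List Int) (idx t : Nat),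
    idx + G.length ≤ dp.length → t < G.length →
    (wr dp idx G).getD (idx + t) 0 = G.getD t 0 := by
  induction G with
  | nil => intro dp idx t _ ht; simp at ht
  | cons r rs ih =>
    intro dp idx t hle ht
    match t with
    | 0 =>
      show (wr (dp.set idx r) (idx + 1) rs).getD idx 0 = (r :: rs).getD 0 0
      rw [wr_getD_lt rs _ (idx + 1) idx (by omega)]
      rw [List.getD, List.getElem?_set_self (by simp at hle ⊢; omega)]
      rfl
    | t' + 1 =>
      rw [wr]
      have := ih (dp.set idx r) (idx + 1) t' (by simp at hle ⊢; omega) (by simp at ht; omega)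
      rw [show idx + (t' + 1) = idx + 1 + t' by omega, this]
      rfl

theorem parf_cases (x : Int) : parf x = 0 ∨ parf x = 1 := by
  unfold parf
  rw [PySem.Int.mod_eq_emod_of_pos (by omega : (0:Int) < 2)]
  omega

theorem start_eq (numbers : List Int) (fuel : Nat) : ∀ (s : Nat),
    solStartA numbers fuel s = skipOddB numbers numbers.length fuel s := by
  induction fuel with
  | zero => intro s; rfl
  | succ f ih =>
    intro s
    rw [solStartA, skipOddB]
    by_cases h1 : s < numbers.length
    · by_cases h2 : PySem.Int.mod (PySem.List.pyGetD numbers (s : Int) 0) 2 = 0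
      · rw [if_pos h1, if_pos h2, if_neg (fun hc => hc.2 h2)]
      · rw [if_pos h1, if_neg h2, if_pos ⟨h1, h2⟩, ih]
    · rw [if_neg h1, if_neg (fun hc => h1 hc.1)]

theorem runsGo_ne_nil (p c : Int) (l : List Int) : runsGo p c l ≠ [] := by
  induction l generalizing p c with
  | nil => simp [runsGo]
  | cons q t ih =>
    rw [runsGo]
    split
    · exact ih p (c + 1)
    · simp

theorem runsGo_entries (l : List Int) : ∀ (p c : Int) (t : Nat),
    (0 ≤ c → 0 ≤ (runsGo p c l).getD t 0) ∧
    (1 ≤ c → t < (runsGo p c l).length → 1 ≤ (runsGo p c l).getD t 0) ∧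
    (0 < t → t < (runsGo p c l).length → 1 ≤ (runsGo p c l).getD t 0) := by
  induction l with
  | nil =>
    intro p c t
    match t with
    | 0 => exact ⟨fun h => h, fun h _ => h, fun h => absurd h (by omega)⟩
    | t' + 1 =>
      refine ⟨fun _ => le_refl 0, fun _ h => ?_, fun _ h => ?_⟩ <;> simp [runsGo] at h
  | cons q t' ih =>
    intro p c t
    rw [runsGo]
    split
    · obtain ⟨h1, h2, h3⟩ := ih p (c + 1) t
      exact ⟨fun hc => h1 (by omega), fun hc => h2 (by omega), h3⟩
    · match t with
      | 0 =>
        refine ⟨fun hc => hc, fun hc _ => hc, fun h => absurd h (by omega)⟩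
      | u + 1 =>
        obtain ⟨h1, h2, h3⟩ := ih q 1 u
        have hlen : (c :: runsGo q 1 t').length = (runsGo q 1 t').length + 1 := by simp
        refine ⟨fun _ => h1 (by omega), fun _ hu => ?_, fun _ hu => ?_⟩
        · exact h2 (le_refl 1) (by omega)
        · exact h2 (le_refl 1) (by omega)

theorem runsGo_length (l : List Int) : ∀ (p c : Int),
    (runsGo p c l).length ≤ l.length + 1 := by
  induction l with
  | nil => intro p c; simp [runsGo]
  | cons q t ih =>
    intro p c
    rw [runsGo]
    split
    · exact le_trans (ih p (c + 1)) (by simp)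
    · simpa using ih q 1

-- tail dispatcher of the run machine (proof helper)
def rlen (L : List Int) : List Int :=
  match L with
  | [] => []
  | p :: t => runsGo p 1 t

theorem runsGo_take_drop (l : List Int) : ∀ (p c : Int),
    runsGo p c l = (c + ((l.takeWhile (· == p)).length : Int)) :: rlen (l.dropWhile (· == p)) := by
  induction l with
  | nil => intro p c; simp [runsGo, rlen]
  | cons q t ih =>
    intro p c
    rw [runsGo]
    by_cases h : q = p
    · rw [if_pos h, ih p (c + 1), List.takeWhile_cons_of_pos (by simp [h]),
        List.dropWhile_cons_of_pos (by simp [h])]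
      simp only [List.length_cons]
      congr 1
      push_cast
      omega
    · rw [if_neg h, List.takeWhile_cons_of_neg (by simp [h]),
        List.dropWhile_cons_of_neg (by simp [h])]
      simp [rlen]

theorem esum_empty (R : List Int) (s i : Nat) (h : i ≤ s) : esum R s i = 0 := by
  unfold esum
  rw [Finset.Ico_eq_empty (by omega), Finset.sum_empty]

theorem osum_empty (R : List Int) (s i : Nat) (h : i ≤ s) : osum R s i = 0 := by
  unfold osum
  rw [Finset.Ico_eq_empty (by omega), Finset.sum_empty]

theorem esum_succ_top (R : List Int) (s i : Nat) (h : s ≤ i) :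
    esum R s (i + 1) = esum R s i + if i % 2 = 0 then R.getD i 0 else 0 := by
  unfold esum
  exact Finset.sum_Ico_succ_top h _

theorem osum_succ_top (R : List Int) (s i : Nat) (h : s ≤ i) :
    osum R s (i + 1) = osum R s i + if i % 2 = 1 then R.getD i 0 else 0 := by
  unfold osum
  exact Finset.sum_Ico_succ_top h _

theorem esum_split (R : List Int) (s t i : Nat) (h1 : s ≤ t) (h2 : t ≤ i) :
    esum R s i = esum R s t + esum R t i := by
  unfold esum
  exact (Finset.sum_Ico_consecutive _ h1 h2).symm

theorem osum_split (R : List Int) (s t i : Nat) (h1 : s ≤ t) (h2 : t ≤ i) :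
    osum R s i = osum R s t + osum R t i := by
  unfold osum
  exact (Finset.sum_Ico_consecutive _ h1 h2).symm

theorem esum_bot2 (R : List Int) (s i : Nat) (hs : s % 2 = 0) (h : s + 2 ≤ i) :
    esum R s i = R.getD s 0 + esum R (s + 2) i := by
  rw [esum_split R s (s + 2) i (by omega) h,
    esum_split R s (s + 1) (s + 2) (by omega) (by omega),
    esum_succ_top R s s (le_refl s), esum_empty R s s (le_refl s),
    esum_succ_top R (s + 1) (s + 1) (le_refl _), esum_empty R (s + 1) (s + 1) (le_refl _),
    if_pos hs, if_neg (by omega)]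
  ring

theorem osum_bot2 (R : List Int) (s i : Nat) (hs : s % 2 = 0) (h : s + 2 ≤ i) :
    osum R s i = R.getD (s + 1) 0 + osum R (s + 2) i := by
  rw [osum_split R s (s + 2) i (by omega) h,
    osum_split R s (s + 1) (s + 2) (by omega) (by omega),
    osum_succ_top R s s (le_refl s), osum_empty R s s (le_refl s),
    osum_succ_top R (s + 1) (s + 1) (le_refl _), osum_empty R (s + 1) (s + 1) (le_refl _),
    if_neg (by omega), if_pos (by omega)]
  ring

theorem osum_nonneg (R : List Int) (Hnn : ∀ t : Nat, 0 ≤ R.getD t 0) (s i : Nat) :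
    0 ≤ osum R s i := by
  unfold osum
  refine Finset.sum_nonneg (fun t _ => ?_)
  split
  · exact Hnn t
  · exact le_refl 0

theorem osum_ge_entry (R : List Int) (Hnn : ∀ t : Nat, 0 ≤ R.getD t 0)
    (s t i : Nat) (h1 : s ≤ t) (h2 : t + 1 ≤ i) (ht : t % 2 = 1) :
    R.getD t 0 ≤ osum R s i := by
  rw [osum_split R s t i h1 (by omega), osum_split R t (t + 1) i (by omega) h2,
    osum_succ_top R t t (le_refl t), osum_empty R t t (le_refl t), if_pos ht]
  have := osum_nonneg R Hnn s t
  have := osum_nonneg R Hnn (t + 1) i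
  omega

theorem solStartA_spec (numbers : List Int) : ∀ (fuel s : Nat),
    s ≤ numbers.length → numbers.length ≤ fuel + s →
    s ≤ solStartA numbers fuel s ∧ solStartA numbers fuel s ≤ numbers.length ∧
    (solStartA numbers fuel s < numbers.length →
      parf (numbers.getD (solStartA numbers fuel s) 0) = 0) := by
  intro fuel
  induction fuel with
  | zero =>
    intro s hs hf
    rw [solStartA]
    exact ⟨le_refl s, hs, fun h => absurd h (by omega)⟩
  | succ f ih =>
    intro s hs hf
    rw [solStartA]
    by_cases h1 : s < numbers.length
    · rw [if_pos h1]
      by_cases h2 : PySem.Int.mod (PySem.List.pyGetD numbers (s : Int) 0) 2 = 0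
      · rw [if_pos h2]
        refine ⟨le_refl s, by omega, fun _ => ?_⟩
        rw [parf, ← PySem.List.pyGetD_natCast (xs := numbers) (n := s) (d := 0)]
        exact h2
      · rw [if_neg h2]
        obtain ⟨ha, hb, hc⟩ := ih (s + 1) (by omega) (by omega)
        exact ⟨by omega, hb, hc⟩
    · rw [if_neg h1]
      exact ⟨le_refl s, hs, fun h => absurd h h1⟩

theorem getLastD_irrel {l : List Int} (h : l ≠ []) (d d' : Int) :
    l.getLastD d = l.getLastD d' := by
  cases l with
  | nil => exact absurd rfl h
  | cons a t =>
    induction t generalizing a with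
    | nil => rfl
    | cons b t2 ih2 => exact ih2 b (by simp)

theorem phase1_eq (l : List Int) : ∀ (dp : List Int) (idx : Nat) (p c : Int),
    p = 0 ∨ p = 1 →
    ∃ b, l.foldl phase1A (dp, idx, (p == 0), c, idx) =
      (wr dp idx (runsGo p c (l.map parf)).dropLast,
       idx + (runsGo p c (l.map parf)).length - 1, b,
       (runsGo p c (l.map parf)).getLastD 0,
       idx + (runsGo p c (l.map parf)).length - 1) := by
  induction l with
  | nil =>
    intro dp idx p c _
    exact ⟨(p == 0), by simp [runsGo, wr]⟩
  | cons x t ih =>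
    intro dp idx p c hp
    rw [List.foldl_cons, List.map_cons]
    rcases parf_cases x with hx | hx
    all_goals rcases hp with hp | hp
    all_goals subst hp
    all_goals simp only [parf] at hx
    · -- p = 0, x even: same run continues
      have hstep : phase1A (dp, idx, ((0 : Int) == 0), c, idx) x
          = (dp, idx, ((0 : Int) == 0), c + 1, idx) := by
        have hdvd := (PySem.Int.mod_eq_zero_iff_dvd x 2).mp hx
        simp [phase1A, hdvd]
      rw [hstep, runsGo, if_pos (by rw [show parf x = 0 from hx])]
      exact ih dp idx 0 (c + 1) (Or.inl rfl)
    · -- p = 1, x even: run flips to even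
      have hstep : phase1A (dp, idx, ((1 : Int) == 0), c, idx) x
          = (dp.set idx c, idx + 1, ((0 : Int) == 0), 1, idx + 1) := by
        have hdvd := (PySem.Int.mod_eq_zero_iff_dvd x 2).mp hx
        simp [phase1A, hdvd]
      rw [hstep, runsGo, if_neg (by rw [show parf x = 0 from hx]; omega)]
      obtain ⟨b, hb⟩ := ih (dp.set idx c) (idx + 1) 0 1 (Or.inl rfl)
      refine ⟨b, ?_⟩
      rw [hb]
      have hne := runsGo_ne_nil 0 1 (t.map parf)
      have hlen : 1 ≤ (runsGo 0 1 (t.map parf)).length := by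
        cases h : runsGo 0 1 (t.map parf) with
        | nil => exact absurd h hne
        | cons a u => simp
      rw [show parf x = 0 from hx]
      rw [List.dropLast_cons_of_ne_nil hne]
      refine congrArg₂ _ rfl (congrArg₂ _ ?_ (congrArg₂ _ rfl (congrArg₂ _ ?_ ?_)))
      · simp only [List.length_cons]; omega
      · rw [List.getLastD_cons, getLastD_irrel hne]
      · simp only [List.length_cons]; omega
    · -- p = 0, x odd: run flips to odd
      have hstep : phase1A (dp, idx, ((0 : Int) == 0), c, idx) x
          = (dp.set idx c, idx + 1, ((1 : Int) == 0), 1, idx + 1) := by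
        have hndvd : ¬ ((2 : Int) ∣ x) := by
          rw [← PySem.Int.mod_eq_zero_iff_dvd]
          omega
        simp [phase1A, hndvd]
      rw [hstep, runsGo, if_neg (by rw [show parf x = 1 from hx]; omega)]
      obtain ⟨b, hb⟩ := ih (dp.set idx c) (idx + 1) 1 1 (Or.inr rfl)
      refine ⟨b, ?_⟩
      rw [hb]
      have hne := runsGo_ne_nil 1 1 (t.map parf)
      have hlen : 1 ≤ (runsGo 1 1 (t.map parf)).length := by
        cases h : runsGo 1 1 (t.map parf) with
        | nil => exact absurd h hne
        | cons a u => simp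
      rw [show parf x = 1 from hx]
      rw [List.dropLast_cons_of_ne_nil hne]
      refine congrArg₂ _ rfl (congrArg₂ _ ?_ (congrArg₂ _ rfl (congrArg₂ _ ?_ ?_)))
      · simp only [List.length_cons]; omega
      · rw [List.getLastD_cons, getLastD_irrel hne]
      · simp only [List.length_cons]; omega
    · -- p = 1, x odd: same run continues
      have hstep : phase1A (dp, idx, ((1 : Int) == 0), c, idx) x
          = (dp, idx, ((1 : Int) == 0), c + 1, idx) := by
        have hndvd : ¬ ((2 : Int) ∣ x) := by
          rw [← PySem.Int.mod_eq_zero_iff_dvd]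
          omega
        simp [phase1A, hndvd]
      rw [hstep, runsGo, if_pos (by rw [show parf x = 1 from hx])]
      exact ih dp idx 1 (c + 1) (Or.inr rfl)

theorem getLastD_eq_append (R : List Int) (h : R ≠ []) : R.dropLast ++ [R.getLastD 0] = R := by
  have h1 : R.getLastD 0 = R.getLast h := by
    rw [List.getLastD_eq_getLast?, List.getLast?_eq_getLast_of_ne_nil h]
    rfl
  rw [h1]
  exact List.dropLast_concat_getLast h

-- pairsW block lemmas
theorem pairsW_append (R : List Int) : ∀ (t s : Nat),
    pairsW R s (2 * t + 2) = pairsW R s (2 * t) ++ [(R.getD (s + 2 * t) 0, R.getD (s + 2 * t + 1) 0)] := by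
  intro t
  induction t with
  | zero => intro s; simp [pairsW]
  | succ t ih =>
    intro s
    rw [show 2 * (t + 1) + 2 = (2 * t + 2) + 2 by ring]
    rw [pairsW, ih (s + 2), show 2 * (t + 1) = 2 * t + 2 by ring]
    rw [pairsW]
    simp only [List.cons_append]
    rw [show s + 2 + 2 * t = s + (2 * t + 2) by omega]

-- an all-even block of B's pass (po = 0 throughout)
theorem evenBlock (k : Int) (l : List Int) (hl : ∀ x ∈ l, x = (0 : Int)) :
    ∀ (b ev od pe : Int) (w : List (Int × Int)),
    l.foldl (stepP k) (b, ev, od, pe, 0, w)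
      = ((if l = [] then b else max b (ev + l.length)), ev + l.length, od, pe + l.length, 0, w) := by
  induction l with
  | nil => intro b ev od pe w; simp
  | cons x t ih =>
    intro b ev od pe w
    have hx : x = 0 := hl x (by simp)
    subst hx
    rw [List.foldl_cons]
    have hstep : stepP k (b, ev, od, pe, 0, w) 0
        = ((if ev + 1 > b then ev + 1 else b), ev + 1, od, pe + 1, 0, w) := by
      simp [stepP]
    rw [hstep, ih (fun x hx => hl x (by simp [hx]))]
    have hmax : (if ev + 1 > b then ev + 1 else b) = max b (ev + 1) := by
      rw [Int.max_def]; split_ifs <;> omega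
    rw [hmax]
    by_cases ht : t = []
    · subst ht; simp
    · rw [if_neg ht, if_neg (by simp)]
      have habs : max (max b (ev + 1)) (ev + 1 + t.length) = max b (ev + (t.length + 1)) := by
        rw [Int.max_def, Int.max_def, Int.max_def]
        have : (0 : Int) ≤ t.length := by positivity
        split_ifs <;> push_cast <;> omega
      simp only [List.length_cons, Nat.cast_add, Nat.cast_one]
      have h1 : ev + 1 + (t.length : Int) = ev + ((t.length : Int) + 1) := by ring
      have h2 : pe + 1 + (t.length : Int) = pe + ((t.length : Int) + 1) := by ring
      rw [habs, h1, h2]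

-- an all-odd block of B's pass only grows pend_o
theorem oddBlock (k : Int) (l : List Int) (hl : ∀ x ∈ l, x = (1 : Int)) :
    ∀ (b ev od pe po : Int) (w : List (Int × Int)),
    l.foldl (stepP k) (b, ev, od, pe, po, w) = (b, ev, od, pe, po + l.length, w) := by
  induction l with
  | nil => intro b ev od pe po w; simp
  | cons x t ih =>
    intro b ev od pe po w
    have hx : x = 1 := hl x (by simp)
    subst hx
    rw [List.foldl_cons]
    have hstep : stepP k (b, ev, od, pe, po, w) 1 = (b, ev, od, pe, po + 1, w) := by
      simp [stepP]
    rw [hstep, ih (fun x hx => hl x (by simp [hx]))]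
    simp only [List.length_cons, Nat.cast_add, Nat.cast_one]
    have h1 : po + 1 + (t.length : Int) = po + ((t.length : Int) + 1) := by ring
    rw [h1]

theorem phase2A_fst_odd (dp : List Int) (k : Int) (st : Int × Int × Nat × Int) (i : Nat)
    (hi : ¬ i % 2 = 0) : (phase2A dp k st i).1 = st.1 := by
  obtain ⟨mc, rk, si, ct⟩ := st
  rw [phase2A, if_neg hi]
  dsimp only
  split <;> rfl

theorem getD_of_drop_cons (R : List Int) (j : Nat) (a : Int) (l : List Int)
    (h : R.drop j = a :: l) : R.getD j 0 = a := by
  have h0 : (R.drop j).getD 0 0 = a := by rw [h]; rfl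
  rw [← h0, List.getD, List.getD, List.getElem?_drop]
  simp

theorem dropWhile_head_neg {p : Int → Bool} (l : List Int) : ∀ (h : Int) (t : List Int),
    l.dropWhile p = h :: t → p h = false := by
  induction l with
  | nil => intro h t hd; simp [List.dropWhile] at hd
  | cons a u ih =>
    intro h t hd
    rw [List.dropWhile_cons] at hd
    by_cases hp : p a
    · rw [if_pos hp] at hd; exact ih h t hd
    · rw [if_neg hp] at hd
      rw [List.cons.injEq] at hd
      obtain ⟨rfl, -⟩ := hd
      simpa using hp

-- the inner while loops of A (index two-pointer) and B (queue pops) agree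
theorem loop_eq (R dp : List Int) (k : Int)
    (hagree : ∀ t : Nat, t < R.length → dp.getD t 0 = R.getD t 0)
    (Hnn : ∀ t : Nat, 0 ≤ R.getD t 0)
    (Hpos : ∀ t : Nat, 0 < t → t < R.length → 1 ≤ R.getD t 0)
    (j : Nat) (hj : j % 2 = 0) (hjR : j + 1 < R.length) :
    ∀ (m si : Nat), si + 2 * m = j → si % 2 = 0 →
    ∀ fuelA, m < fuelA →
    ∃ si', si ≤ si' ∧ si' ≤ j ∧ si' % 2 = 0 ∧
      whileA dp k (R.getD (j+1) 0) (j+1) fuelA (esum R si (j+1)) (k - osum R si (j+1)) si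
        = (esum R si' (j+1), k - osum R si' (j+1), si') ∧
      popB k (R.getD (j+1) 0) (esum R si (j+1)) (osum R si (j+1)) (pairsW R si (j - si))
        = (esum R si' (j+1), osum R si' (j+1), pairsW R si' (j - si')) := by
  intro m
  induction m with
  | zero =>
    intro si hsum hsie fuelA hf
    have hos : osum R si (j + 1) = 0 := by
      rw [show j + 1 = si + 1 by omega, osum_succ_top R si si (le_refl _),
        osum_empty R si si (le_refl _), if_neg (by omega)]
      ring
    refine ⟨si, le_refl _, by omega, hsie, ?_, ?_⟩
    · match fuelA, hf with
      | f + 1, _ =>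
        rw [whileA, if_neg ?_]
        intro ⟨_, _, h3⟩
        rw [hos] at h3
        omega
    · rw [show j - si = 0 by omega]
      rfl
  | succ m' ih =>
    intro si hsum hsie fuelA hf
    have hsilt : si + 2 ≤ j := by omega
    have hml : j - si = 2 * m' + 2 := by omega
    have hpw : pairsW R si (j - si)
        = (R.getD si 0, R.getD (si + 1) 0) :: pairsW R (si + 2) (2 * m') := by
      rw [hml, pairsW]
    have hopos : 0 < osum R si (j + 1) := by
      have h1 : (1 : Int) ≤ R.getD (si + 1) 0 := Hpos (si + 1) (by omega) (by omega)
      have := osum_ge_entry R Hnn si (si + 1) (j + 1) (by omega) (by omega) (by omega)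
      omega
    have heb : esum R si (j + 1) - R.getD si 0 = esum R (si + 2) (j + 1) := by
      rw [esum_bot2 R si (j + 1) hsie (by omega)]
      ring
    have hob : k - osum R si (j + 1) + R.getD (si + 1) 0 = k - osum R (si + 2) (j + 1) := by
      rw [osum_bot2 R si (j + 1) hsie (by omega)]
      ring
    have hob2 : osum R si (j + 1) - R.getD (si + 1) 0 = osum R (si + 2) (j + 1) := by
      rw [osum_bot2 R si (j + 1) hsie (by omega)]
      ring
    by_cases hc : R.getD (j + 1) 0 > k - osum R si (j + 1)
    · obtain ⟨si', h1, h2, h3, h4, h5⟩ := ih (si + 2) (by omega) (by omega) (fuelA - 1) (by omega)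
      refine ⟨si', by omega, h2, h3, ?_, ?_⟩
      · match fuelA, hf with
        | f + 1, _ =>
          rw [whileA, if_pos ⟨by omega, hc, by omega⟩]
          simp only [PySem.List.pyGetD_natCast]
          rw [hagree si (by omega), hagree (si + 1) (by omega), heb, hob]
          simpa using h4
      · rw [hpw, popB, if_pos (by omega), heb, hob2,
          show 2 * m' = j - (si + 2) by omega]
        exact h5
    · refine ⟨si, le_refl _, by omega, hsie, ?_, ?_⟩
      · match fuelA, hf with
        | f + 1, _ =>
          rw [whileA, if_neg (fun hh => hc hh.2.1)]
      · rw [hpw, popB, if_neg (by omega), ← hpw]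

-- evaluation lemmas for one even element of B
theorem stepP_even_noflow (k b ev od pe po : Int) (w : List (Int × Int))
    (hpo : po ≠ 0) (hle : ¬ od + po > k) :
    stepP k (b, ev, od, pe, po, w) 0
      = ((if ev + 1 > b then ev + 1 else b), ev + 1, od + po, 1, 0, w ++ [(pe, po)]) := by
  simp [stepP, hpo, hle]

theorem stepP_even_jump (k b ev od pe po : Int)
    (hpo : po ≠ 0) (hgt : od + po > k) :
    stepP k (b, ev, od, pe, po, []) 0
      = ((if (1 : Int) > b then 1 else b), 1, od, 1, 0, ([] : List (Int × Int))) := by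
  simp [stepP, hpo, hgt]

theorem stepP_even_pop (k b ev od pe po e0 o0 : Int) (w' : List (Int × Int))
    (ev2 od2 : Int) (w2 : List (Int × Int)) (hpo : po ≠ 0) (hgt : od + po > k)
    (hpop : popB k po (ev - e0) (od - o0) w' = (ev2, od2, w2)) :
    stepP k (b, ev, od, pe, po, (e0, o0) :: w') 0
      = ((if ev2 + 1 > b then ev2 + 1 else b), ev2 + 1, od2 + po, 1, 0, w2 ++ [(pe, po)]) := by
  simp [stepP, hpo, hgt, hpop]

-- the main simulation: A's remaining fold over run indices vs B's remaining element fold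
theorem core (R dp : List Int) (k : Int)
    (hagree : ∀ t : Nat, t < R.length → dp.getD t 0 = R.getD t 0)
    (Hnn : ∀ t : Nat, 0 ≤ R.getD t 0)
    (Hpos : ∀ t : Nat, 0 < t → t < R.length → 1 ≤ R.getD t 0) :
    ∀ (n : Nat) (u : List Int), u.length ≤ n →
    ∀ (j si : Nat) (mc : Int),
    j % 2 = 0 → si % 2 = 0 → si ≤ j → j < R.length →
    ((u = [] ∧ j + 1 = R.length) ∨ (u ≠ [] ∧ runsGo 1 0 u = R.drop (j + 1))) →
    (∀ x ∈ u, x = (0 : Int) ∨ x = (1 : Int)) →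
    ((List.range' (j + 1) (R.length - (j + 1))).foldl (phase2A dp k)
        (mc, k - osum R si (j + 1), si, esum R si (j + 1))).1
    = (u.foldl (stepP k)
        (mc, esum R si (j + 1), osum R si (j + 1), R.getD j 0, 0, pairsW R si (j - si))).1 := by
  intro n
  induction n with
  | zero =>
    intro u hu j si mc hj hsi hsij hjR hU hmem
    have hu0 : u = [] := by
      cases u with
      | nil => rfl
      | cons a t => simp at hu
    subst hu0
    rcases hU with ⟨-, hR⟩ | ⟨hne, -⟩
    · rw [show R.length - (j + 1) = 0 by omega]
      rfl
    · exact absurd rfl hne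
  | succ n ihn =>
    intro u hu j si mc hj hsi hsij hjR hU hmem
    rcases hU with ⟨hu0, hR⟩ | ⟨hne, hrg⟩
    · subst hu0
      rw [show R.length - (j + 1) = 0 by omega]
      rfl
    · -- odd run at the head of u
      have htd := runsGo_take_drop u 1 0
      rw [hrg] at htd
      set o := (u.takeWhile (· == (1 : Int))).length with ho
      set u' := u.dropWhile (· == (1 : Int)) with hu'
      have hRj1 : R.getD (j + 1) 0 = (o : Int) := by
        have h1 := getD_of_drop_cons R (j + 1) _ _ htd
        rw [h1]
        ring
      have hdropj2 : R.drop (j + 2) = rlen u' := by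
        have h2 : R.drop (j + 2) = (R.drop (j + 1)).drop 1 := by
          rw [List.drop_drop]
        rw [h2, htd]
        rfl
      have hj1R : j + 1 < R.length := by
        have h2 : R.drop (j + 1) ≠ [] := by rw [htd]; simp
        by_contra hcon
        rw [List.drop_eq_nil_of_le (by omega)] at h2
        exact h2 rfl
      have ho1 : 1 ≤ o := by
        have h3 := Hpos (j + 1) (by omega) hj1R
        rw [hRj1] at h3
        exact_mod_cast h3
      have hpone : ((o : Int)) ≠ 0 := by
        have : (0 : Int) < (o : Int) := by exact_mod_cast ho1
        omega
      have hsplit : u.takeWhile (· == (1 : Int)) ++ u' = u := List.takeWhile_append_dropWhile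
      have htw1 : ∀ x ∈ u.takeWhile (· == (1 : Int)), x = (1 : Int) := fun x hx => by
        have := List.mem_takeWhile_imp hx
        simpa using this
      have hulen : u.length = o + u'.length := by
        have := congrArg List.length hsplit
        simp at this
        omega
      rw [← hsplit, List.foldl_append, oddBlock k _ htw1, zero_add, ← ho]
      cases hq : u' with
      | nil =>
        -- the odd run is the last run: both sides keep mc
        have hjlast : R.length = j + 2 := by
          have h4 : R.drop (j + 2) = [] := by rw [hdropj2, hq]; rfl
          have h5 := List.drop_eq_nil_iff.mp h4
          omega
        rw [show R.length - (j + 1) = 1 by omega]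
        rw [show List.range' (j + 1) 1 = [j + 1] from rfl]
        rw [List.foldl_cons, List.foldl_nil, List.foldl_nil]
        rw [phase2A_fst_odd dp k _ (j + 1) (by omega)]
      | cons h t =>
        have hh1 : (h == (1 : Int)) = false := dropWhile_head_neg u h t (by rw [← hu', hq])
        have hmemh : h ∈ u := by
          have hsub := (List.dropWhile_sublist (l := u) (· == (1 : Int))).subset
          exact hsub (by rw [← hu', hq]; simp)
        have hh0 : h = 0 := by
          rcases hmem h hmemh with h6 | h6
          · exact h6
          · rw [h6] at hh1; simp at hh1
        subst hh0
        -- even run after it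
        have htd2 := runsGo_take_drop t 0 1
        have hrlen : rlen u' = runsGo 0 1 t := by rw [hq]; rfl
        set e2 := (t.takeWhile (· == (0 : Int))).length with he2
        set u'' := t.dropWhile (· == (0 : Int)) with hu''
        have htd3 : R.drop (j + 2) = (1 + (e2 : Int)) :: rlen u'' := by
          rw [hdropj2, hrlen, htd2]
        have hRj2 : R.getD (j + 2) 0 = 1 + (e2 : Int) := getD_of_drop_cons _ _ _ _ htd3
        have hj2R : j + 2 < R.length := by
          have h7 : R.drop (j + 2) ≠ [] := by rw [htd3]; simp
          by_contra hcon
          rw [List.drop_eq_nil_of_le (by omega)] at h7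
          exact h7 rfl
        have hdropj3 : R.drop (j + 3) = rlen u'' := by
          have h8 : R.drop (j + 3) = (R.drop (j + 2)).drop 1 := by rw [List.drop_drop]
          rw [h8, htd3]
          rfl
        have htsplit : t.takeWhile (· == (0 : Int)) ++ u'' = t := List.takeWhile_append_dropWhile
        have htw2 : ∀ x ∈ t.takeWhile (· == (0 : Int)), x = (0 : Int) := fun x hx => by
          have := List.mem_takeWhile_imp hx
          simpa using this
        have hmemt : ∀ x ∈ t, x = (0 : Int) ∨ x = (1 : Int) := fun x hx => by
          refine hmem x ?_
          have hsub := (List.dropWhile_sublist (l := u) (· == (1 : Int))).subset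
          exact hsub (by rw [← hu', hq]; simp [hx])
        have hmem'' : ∀ x ∈ u'', x = (0 : Int) ∨ x = (1 : Int) := fun x hx => by
          refine hmemt x ?_
          have hsub := (List.dropWhile_sublist (l := t) (· == (0 : Int))).subset
          exact hsub (by rw [← hu'']; exact hx)
        have hlen'' : u''.length ≤ n := by
          have h9 : u''.length ≤ t.length := (List.dropWhile_sublist (l := t) _).length_le
          have h10 : u'.length = t.length + 1 := by rw [hq]; rfl
          omega
        have hU'' : (u'' = [] ∧ (j + 2) + 1 = R.length) ∨
            (u'' ≠ [] ∧ runsGo 1 0 u'' = R.drop ((j + 2) + 1)) := by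
          cases hq2 : u'' with
          | nil =>
            left
            refine ⟨rfl, ?_⟩
            have h11 : R.drop (j + 3) = [] := by rw [hdropj3, hq2]; rfl
            have h12 := List.drop_eq_nil_iff.mp h11
            omega
          | cons h2 t2 =>
            right
            have hh2f : (h2 == (0 : Int)) = false :=
              dropWhile_head_neg t h2 t2 (by rw [← hu'', hq2])
            have hmemh2 : h2 ∈ t := by
              have hsub := (List.dropWhile_sublist (l := t) (· == (0 : Int))).subset
              exact hsub (by rw [← hu'', hq2]; simp)
            have hh21 : h2 = 1 := by
              rcases hmemt h2 hmemh2 with h13 | h13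
              · rw [h13] at hh2f; simp at hh2f
              · exact h13
            subst hh21
            refine ⟨by simp, ?_⟩
            rw [show (j + 2) + 1 = j + 3 from rfl, hdropj3, hq2]
            rw [runsGo, if_pos rfl]
            norm_num [rlen]
        -- the two sides after the odd run and the first even element, then the rest
        have hfin : ∀ (s2 : Nat) (mc' : Int), s2 % 2 = 0 → s2 ≤ j + 2 →
            (((j + 2) :: List.range' (j + 3) (R.length - (j + 3))).foldl (phase2A dp k)
                (mc', k - osum R s2 (j + 2), s2, esum R s2 (j + 2))).1
            = (t.foldl (stepP k)
                ((if esum R s2 (j + 2) + 1 > mc' then esum R s2 (j + 2) + 1 else mc'),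
                 esum R s2 (j + 2) + 1, osum R s2 (j + 2), 1, 0, pairsW R s2 (j + 2 - s2))).1 := by
          intro s2 mc' hs2e hs2le
          have hosum23 : osum R s2 ((j + 2) + 1) = osum R s2 (j + 2) := by
            rw [osum_succ_top R s2 (j + 2) (by omega), if_neg (by omega)]
            ring
          have hesum23 : esum R s2 ((j + 2) + 1) = esum R s2 (j + 2) + (1 + (e2 : Int)) := by
            rw [esum_succ_top R s2 (j + 2) (by omega), if_pos (by omega), hRj2]
          have hA2 : phase2A dp k (mc', k - osum R s2 (j + 2), s2, esum R s2 (j + 2)) (j + 2)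
              = (max mc' (esum R s2 (j + 2) + (1 + (e2 : Int))), k - osum R s2 (j + 2), s2,
                 esum R s2 (j + 2) + (1 + (e2 : Int))) := by
            unfold phase2A
            dsimp only
            rw [if_pos (by omega)]
            simp only [PySem.List.pyGetD_natCast]
            rw [hagree (j + 2) hj2R, hRj2]
          rw [List.foldl_cons, hA2]
          rw [← htsplit, List.foldl_append, evenBlock k _ htw2, ← he2]
          have hmaxIf : (if esum R s2 (j + 2) + 1 > mc' then esum R s2 (j + 2) + 1 else mc')
              = max mc' (esum R s2 (j + 2) + 1) := by
            rw [Int.max_def]; split_ifs <;> omega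
          have hb : (if (t.takeWhile (· == (0 : Int))) = []
                then max mc' (esum R s2 (j + 2) + 1)
                else max (max mc' (esum R s2 (j + 2) + 1))
                  (esum R s2 (j + 2) + 1 + (e2 : Int)))
              = max mc' (esum R s2 (j + 2) + (1 + (e2 : Int))) := by
            by_cases htw0 : (t.takeWhile (· == (0 : Int))) = []
            · rw [if_pos htw0]
              have he20 : e2 = 0 := by rw [he2, htw0]; rfl
              rw [he20]
              norm_num
            · rw [if_neg htw0, Int.max_def, Int.max_def, Int.max_def]
              have he2nn : (0 : Int) ≤ (e2 : Int) := by positivity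
              split_ifs <;> omega
          rw [hmaxIf, hb]
          have hIH := ihn u'' hlen'' (j + 2) s2 (max mc' (esum R s2 (j + 2) + (1 + (e2 : Int))))
            (by omega) hs2e hs2le hj2R hU'' hmem''
          rw [hosum23, hesum23, hRj2] at hIH
          rw [show R.length - (j + 3) = R.length - ((j + 2) + 1) from rfl]
          rw [show esum R s2 (j + 2) + 1 + (e2 : Int) = esum R s2 (j + 2) + (1 + (e2 : Int)) by ring]
          exact hIH
        -- now the odd-run processing itself, three cases
        rw [List.foldl_cons]
        rw [show R.length - (j + 1) = (R.length - (j + 3)) + 2 by omega]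
        rw [List.range'_succ, List.range'_succ, List.foldl_cons]
        rw [show j + 1 + 1 = j + 2 from rfl, show j + 2 + 1 = j + 3 from rfl]
        have hesum12 : ∀ s2 : Nat, s2 ≤ j + 1 → esum R s2 (j + 2) = esum R s2 (j + 1) := by
          intro s2 hs2
          rw [esum_succ_top R s2 (j + 1) (by omega), if_neg (by omega)]
          ring
        by_cases hov : osum R si (j + 1) + (o : Int) > k
        · by_cases hsij2 : si = j
          · -- window is the single even run before the odd run: both restart after it
            have hosj : osum R j (j + 1) = 0 := by
              rw [osum_succ_top R j j (le_refl _), osum_empty R j j (le_refl _),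
                if_neg (by omega)]
              ring
            have hesj : esum R j (j + 1) = R.getD j 0 := by
              rw [esum_succ_top R j j (le_refl _), esum_empty R j j (le_refl _),
                if_pos hj]
              ring
            rw [hsij2]
            have hov' : osum R j (j + 1) + (o : Int) > k := hsij2 ▸ hov
            have hA1 : phase2A dp k (mc, k - osum R j (j + 1), j, esum R j (j + 1)) (j + 1)
                = (mc, k - osum R (j + 2) (j + 2), j + 2, esum R (j + 2) (j + 2)) := by
              unfold phase2A
              dsimp only
              rw [if_neg (by omega)]
              simp only [PySem.List.pyGetD_natCast]
              rw [hagree (j + 1) hj1R, hRj1]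
              rw [if_pos (by omega)]
              rw [hagree j (by omega)]
              rw [show (j + 1) + 1 = j + 2 from rfl]
              rw [whileA, if_neg (by omega)]
              rw [osum_empty R (j + 2) (j + 2) (le_refl _),
                esum_empty R (j + 2) (j + 2) (le_refl _), hosj, hesj]
              norm_num
            rw [hA1]
            rw [osum_empty R (j + 2) (j + 2) (le_refl _), esum_empty R (j + 2) (j + 2) (le_refl _)]
            rw [show j - j = 0 by omega]
            rw [show pairsW R j 0 = [] from rfl]
            rw [stepP_even_jump k mc (esum R j (j + 1)) (osum R j (j + 1))
              (R.getD j 0) (o : Int) hpone (by omega)]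
            rw [hosj]
            have H := hfin (j + 2) mc (by omega) (by omega)
            rw [esum_empty R (j + 2) (j + 2) (le_refl _),
              osum_empty R (j + 2) (j + 2) (le_refl _), Nat.sub_self] at H
            simp only [zero_add, pairsW] at H
            exact H
          · -- evict pairs from the front of the window
            have hsilt : si + 2 ≤ j := by omega
            obtain ⟨m0, hm0⟩ : ∃ m0, si + 2 + 2 * m0 = j := ⟨(j - si - 2) / 2, by omega⟩
            have heb : esum R si (j + 1) - R.getD si 0 = esum R (si + 2) (j + 1) := by
              rw [esum_bot2 R si (j + 1) hsi (by omega)]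
              ring
            have hob : k - osum R si (j + 1) + R.getD (si + 1) 0
                = k - osum R (si + 2) (j + 1) := by
              rw [osum_bot2 R si (j + 1) hsi (by omega)]
              ring
            have hob2 : osum R si (j + 1) - R.getD (si + 1) 0 = osum R (si + 2) (j + 1) := by
              rw [osum_bot2 R si (j + 1) hsi (by omega)]
              ring
            obtain ⟨si', hs1, hs2, hs3, hw4, hw5⟩ := loop_eq R dp k hagree Hnn Hpos j hj hj1R
              m0 (si + 2) hm0 (by omega) (j + 2) (by omega)
            have hA1 : phase2A dp k (mc, k - osum R si (j + 1), si, esum R si (j + 1)) (j + 1)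
                = (mc, k - osum R si' (j + 1) - (o : Int), si', esum R si' (j + 1)) := by
              unfold phase2A
              dsimp only
              rw [if_neg (by omega)]
              simp only [PySem.List.pyGetD_natCast]
              rw [hagree (j + 1) hj1R, hRj1]
              rw [if_pos (by have := hRj1 ▸ Hnn (j + 1); omega)]
              rw [hagree si (by omega), hagree (si + 1) (by omega), heb, hob]
              rw [show (j + 1) + 1 = j + 2 from rfl]
              rw [← hRj1, hw4, hRj1]
            rw [hA1]
            have hpw2 : pairsW R si (j - si)
                = (R.getD si 0, R.getD (si + 1) 0) :: pairsW R (si + 2) (j - (si + 2)) := by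
              rw [show j - si = 2 * m0 + 2 by omega, pairsW, show 2 * m0 = j - (si + 2) by omega]
            have hpop : popB k (o : Int) (esum R si (j + 1) - R.getD si 0)
                (osum R si (j + 1) - R.getD (si + 1) 0) (pairsW R (si + 2) (j - (si + 2)))
                = (esum R si' (j + 1), osum R si' (j + 1), pairsW R si' (j - si')) := by
              rw [heb, hob2, ← hRj1]
              exact hw5
            rw [hpw2, stepP_even_pop k mc (esum R si (j + 1)) (osum R si (j + 1))
              (R.getD j 0) (o : Int) (R.getD si 0) (R.getD (si + 1) 0)
              (pairsW R (si + 2) (j - (si + 2))) (esum R si' (j + 1)) (osum R si' (j + 1))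
              (pairsW R si' (j - si')) hpone (by omega) hpop]
            have hosum2 : osum R si' (j + 2) = osum R si' (j + 1) + (o : Int) := by
              rw [osum_succ_top R si' (j + 1) (by omega), if_pos (by omega), hRj1]
            obtain ⟨t0, ht0⟩ : ∃ t0, j - si' = 2 * t0 := ⟨(j - si') / 2, by omega⟩
            have hwapp : pairsW R si' (j - si') ++ [(R.getD j 0, (o : Int))]
                = pairsW R si' (j + 2 - si') := by
              rw [show j + 2 - si' = 2 * t0 + 2 by omega, pairsW_append, ht0]
              rw [show si' + 2 * t0 = j by omega, hRj1]
            rw [hwapp]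
            have H := hfin si' mc hs3 (by omega)
            rw [hesum12 si' (by omega), hosum2] at H
            rw [show k - (osum R si' (j + 1) + (o : Int))
              = k - osum R si' (j + 1) - (o : Int) by ring] at H
            exact H
        · -- the odd run still fits: append it to the window
          have hA1 : phase2A dp k (mc, k - osum R si (j + 1), si, esum R si (j + 1)) (j + 1)
              = (mc, k - osum R si (j + 1) - (o : Int), si, esum R si (j + 1)) := by
            unfold phase2A
            dsimp only
            rw [if_neg (by omega)]
            simp only [PySem.List.pyGetD_natCast]
            rw [hagree (j + 1) hj1R, hRj1]
            rw [if_neg (by omega)]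
          rw [hA1]
          rw [stepP_even_noflow k mc (esum R si (j + 1)) (osum R si (j + 1))
            (R.getD j 0) (o : Int) (pairsW R si (j - si)) hpone hov]
          have hosum2 : osum R si (j + 2) = osum R si (j + 1) + (o : Int) := by
            rw [osum_succ_top R si (j + 1) (by omega), if_pos (by omega), hRj1]
          obtain ⟨t0, ht0⟩ : ∃ t0, j - si = 2 * t0 := ⟨(j - si) / 2, by omega⟩
          have hwapp : pairsW R si (j - si) ++ [(R.getD j 0, (o : Int))]
              = pairsW R si (j + 2 - si) := by
            rw [show j + 2 - si = 2 * t0 + 2 by omega, pairsW_append, ht0]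
            rw [show si + 2 * t0 = j by omega, hRj1]
          rw [hwapp]
          have H := hfin si mc hsi (by omega)
          rw [hesum12 si (by omega), hosum2] at H
          rw [show k - (osum R si (j + 1) + (o : Int))
            = k - osum R si (j + 1) - (o : Int) by ring] at H
          exact H

theorem solution_spec' : ∀ (n : Int) (k : Int) (numbers : List Int),
    numbers ≠ [] → solution n k numbers = solution_alt n k numbers := by
  intro n k numbers hne
  have hm1 : 1 ≤ numbers.length := List.length_pos_of_ne_nil hne
  obtain ⟨hst1, hst2, hst3⟩ := solStartA_spec numbers (numbers.length + 1) 0 (by omega) (by omega)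
  set st := solStartA numbers (numbers.length + 1) 0 with hstdef
  set parl := (numbers.drop st).map parf with hparl
  set R : List Int := runsGo 0 0 parl with hRdef
  have hRne : R ≠ [] := runsGo_ne_nil 0 0 parl
  have hRpos : 1 ≤ R.length := by
    cases hq : R with
    | nil => exact absurd hq hRne
    | cons a u => simp
  have hdroplen : parl.length = numbers.length - st := by
    rw [hparl, List.length_map, List.length_drop]
  have hheadeven : ∀ a tl, numbers.drop st = a :: tl → parf a = 0 := by
    intro a tl hd
    have hstlt : st < numbers.length := by
      by_contra hc
      rw [List.drop_eq_nil_of_le (by omega)] at hd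
      simp at hd
    have hidx : numbers.getD st 0 = a := by
      have h0 : (numbers.drop st).getD 0 0 = numbers.getD st 0 := by
        rw [List.getD_eq_getElem (numbers.drop st) 0 (by rw [List.length_drop]; omega),
            List.getD_eq_getElem numbers 0 hstlt]
        simp [List.getElem_drop]
      rw [← h0, hd]
      rfl
    rw [← hidx]
    exact hst3 hstlt
  have hRlen : R.length ≤ numbers.length := by
    cases hd : numbers.drop st with
    | nil =>
      have : parl = [] := by rw [hparl, hd]; rfl
      rw [hRdef, this]
      simpa [runsGo] using hm1
    | cons a tl =>
      have hpz := hheadeven a tl hd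
      have : parl = parf a :: tl.map parf := by rw [hparl, hd]; rfl
      rw [hRdef, this, hpz, runsGo, if_pos rfl]
      calc (runsGo 0 1 (tl.map parf)).length
          ≤ (tl.map parf).length + 1 := runsGo_length (tl.map parf) 0 1
        _ = (numbers.drop st).length := by rw [hd]; simp
        _ ≤ numbers.length := by rw [List.length_drop]; omega
  have Hnn : ∀ t : Nat, 0 ≤ R.getD t 0 := fun t => (runsGo_entries parl 0 0 t).1 (le_refl 0)
  have Hpos : ∀ t : Nat, 0 < t → t < R.length → 1 ≤ R.getD t 0 :=
    fun t h1 h2 => (runsGo_entries parl 0 0 t).2.2 h1 h2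
  -- A side: phase 1 produces dp = wr dp0 0 R and dp_count + 1 = R.length
  unfold solution
  rw [← hstdef]
  obtain ⟨b, hb⟩ := phase1_eq (numbers.drop st) (List.replicate numbers.length 0) 0 0 0 (Or.inl rfl)
  rw [← hparl] at hb
  rw [show (true : Bool) = ((0 : Int) == 0) by rfl, hb, ← hRdef]
  dsimp only
  have hsetwr : (wr (List.replicate numbers.length 0) 0 R.dropLast).set
      (0 + R.length - 1) (R.getLastD 0) = wr (List.replicate numbers.length 0) 0 R := by
    conv_rhs => rw [← getLastD_eq_append R hRne]
    rw [wr_append_singleton]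
    congr 1
    rw [List.length_dropLast]
    omega
  have hagree : ∀ t : Nat, t < R.length →
      (wr (List.replicate numbers.length 0) 0 R).getD t 0 = R.getD t 0 := by
    intro t ht
    have := wr_getD R (List.replicate numbers.length 0) 0 t
      (by rw [List.length_replicate]; omega) ht
    simpa using this
  rw [hsetwr, show 0 + R.length - 1 + 1 = R.length by omega]
  -- B side
  unfold solution_alt
  dsimp only
  rw [← start_eq numbers (numbers.length + 1) 0, ← hstdef]
  have hBfold : (numbers.drop st).foldl (stepB k)
        ((0 : Int), (0 : Int), (0 : Int), (0 : Int), (0 : Int), ([] : List (Int × Int)))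
      = parl.foldl (stepP k) (0, 0, 0, 0, 0, []) := by
    rw [hparl, List.foldl_map]
    rfl
  rw [hBfold]
  by_cases hpe : parl = []
  · -- no even element at all: both sides are 0
    rw [hpe, List.foldl_nil]
    have hR0 : R = [0] := by rw [hRdef, hpe]; rfl
    rw [hR0]
    show ((List.range 1).foldl (phase2A (wr (List.replicate numbers.length 0) 0 [0]) k)
        (0, k, 0, 0)).1 = 0
    rw [show List.range 1 = [0] from rfl, List.foldl_cons, List.foldl_nil]
    unfold phase2A
    dsimp only
    rw [if_pos (by omega)]
    simp only [PySem.List.pyGetD_natCast]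
    have h1 := hagree 0 (by omega)
    rw [hR0] at h1
    simp only [h1]
    simp
  · -- parl starts with an even element
    have htd0 := runsGo_take_drop parl 0 0
    rw [← hRdef] at htd0
    set tw0 := parl.takeWhile (· == (0 : Int)) with htw0
    set u0 := parl.dropWhile (· == (0 : Int)) with hu0
    have hmemparl : ∀ x ∈ parl, x = (0 : Int) ∨ x = (1 : Int) := by
      intro x hx
      rw [hparl] at hx
      obtain ⟨y, -, rfl⟩ := List.mem_map.mp hx
      exact parf_cases y
    have hph0 : ∃ pt, parl = 0 :: pt := by
      cases hd : numbers.drop st with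
      | nil =>
        exact absurd (by rw [hparl, hd]; rfl) hpe
      | cons a tl =>
        have hpz := hheadeven a tl hd
        refine ⟨tl.map parf, ?_⟩
        rw [hparl, hd, List.map_cons, hpz]
    obtain ⟨pt, hppt⟩ := hph0
    have htw0ne : tw0 ≠ [] := by
      rw [htw0, hppt, List.takeWhile_cons_of_pos (by simp)]
      simp
    have htw0mem : ∀ x ∈ tw0, x = (0 : Int) := fun x hx => by
      have := List.mem_takeWhile_imp hx
      simpa using this
    have hmemu0 : ∀ x ∈ u0, x = (0 : Int) ∨ x = (1 : Int) := fun x hx => by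
      refine hmemparl x ?_
      exact (List.dropWhile_sublist (l := parl) (· == (0 : Int))).subset (by rw [← hu0]; exact hx)
    have hR0get : R.getD 0 0 = (tw0.length : Int) := by
      have h1 := getD_of_drop_cons R 0 _ _ (by rw [List.drop_zero]; exact htd0)
      rw [h1]
      ring
    have hdrop1 : R.drop 1 = rlen u0 := by
      rw [htd0]
      rfl
    have hos01 : osum R 0 1 = 0 := by
      rw [osum_succ_top R 0 0 (le_refl _), osum_empty R 0 0 (le_refl _), if_neg (by omega)]
      ring
    have hes01 : esum R 0 1 = R.getD 0 0 := by
      rw [esum_succ_top R 0 0 (le_refl _), esum_empty R 0 0 (le_refl _), if_pos (by omega)]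
      ring
    have hU0 : (u0 = [] ∧ 0 + 1 = R.length) ∨ (u0 ≠ [] ∧ runsGo 1 0 u0 = R.drop (0 + 1)) := by
      cases hq0 : u0 with
      | nil =>
        left
        refine ⟨rfl, ?_⟩
        have h2 : R = (0 + (tw0.length : Int)) :: rlen u0 := htd0
        rw [hq0] at h2
        rw [h2]
        rfl
      | cons h2 t2 =>
        right
        have hh2f : (h2 == (0 : Int)) = false := dropWhile_head_neg parl h2 t2 (by rw [← hu0, hq0])
        have hmemh2 : h2 ∈ parl :=
          (List.dropWhile_sublist (l := parl) (· == (0 : Int))).subset (by rw [← hu0, hq0]; simp)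
        have hh21 : h2 = 1 := by
          rcases hmemparl h2 hmemh2 with h3 | h3
          · rw [h3] at hh2f; simp at hh2f
          · exact h3
        subst hh21
        refine ⟨by simp, ?_⟩
        rw [show (0 : Nat) + 1 = 1 from rfl, hdrop1, hq0]
        rw [runsGo, if_pos rfl]
        norm_num [rlen]
    -- B: even block then core
    have hps : parl = tw0 ++ u0 := (List.takeWhile_append_dropWhile).symm
    rw [hps, List.foldl_append, evenBlock k tw0 htw0mem, if_neg htw0ne]
    simp only [zero_add]
    -- A: first run, then core
    rw [List.range_eq_range', show R.length = (R.length - 1) + 1 by omega, List.range'_succ,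
      List.foldl_cons]
    have hA0 : phase2A (wr (List.replicate numbers.length 0) 0 R) k (0, k, 0, 0) 0
        = (max 0 (R.getD 0 0), k - 0, 0, R.getD 0 0) := by
      unfold phase2A
      dsimp only
      rw [if_pos (by omega)]
      simp only [PySem.List.pyGetD_natCast]
      rw [hagree 0 (by omega)]
      norm_num
    rw [hA0]
    have H := core R (wr (List.replicate numbers.length 0) 0 R) k hagree Hnn Hpos
      u0.length u0 (le_refl _) 0 0 (max 0 (R.getD 0 0)) rfl rfl (le_refl _) (by omega) hU0 hmemu0
    simp only [Nat.zero_add] at H ⊢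
    rw [hos01, hes01] at H
    rw [show pairsW R 0 (0 - 0) = ([] : List (Int × Int)) from rfl] at H
    rw [← hR0get]
    exact H

-- ===== VERDICT (by name: the statement is the Claim_ definition above) =====
theorem solution_spec : Claim_equal_solution := by
  intro n k numbers _hd hpre
  unfold Spec_solution
  exact solution_spec' n k numbers hpre
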